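-- pv_equiv track=rewrite | github.com/andreamad8/FSB | prompts/wizard_of_wikipedia_parse.py | convert_sample_to_shot_wow
-- ===== SOURCE A (Python) =====
-- def convert_sample_to_shot_wow(sample, level):
--     prefix = "Dialogue:\n"
--     for id_t, turn in enumerate(sample["dialogue"]):
--         if id_t == len(sample["dialogue"])-1:
--             prefix += f"User: {turn[0]}" +"\n"
--             if turn[1] != "":
--                 prefix += f"Search: {turn[1]}" +"\n"
--             else:
--                 prefix += f"Search:"
--                 return prefix
--         else:
--             prefix += f"User: {turn[0]}" +"\n"
--             prefix += f"Assistant: {turn[1]}" +"\n"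
--
--     return prefix
-- ===== SOURCE B (Python) =====
-- def convert_sample_to_shot_wow(sample, level):
--     def fmt(turns):
--         if not turns:
--             return ""
--         u, v = turns[0]
--         if len(turns) > 1:
--             return f"User: {u}\nAssistant: {v}\n" + fmt(turns[1:])
--         return f"User: {u}\n" + (f"Search: {v}\n" if v != "" else "Search:")
--     return "Dialogue:\n" + fmt(sample["dialogue"])
-- ===== Notes on version B (the rewrite author's own statement) =====
-- stated objective: alternative
-- what changed: Replaces the indexed enumerate loop with the 'id_t == len-1' test and mid-loop return by structural recursion on the turn list ([], singleton, cons cases), suffix-first, with no indices or length comparison.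
import Mathlib
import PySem

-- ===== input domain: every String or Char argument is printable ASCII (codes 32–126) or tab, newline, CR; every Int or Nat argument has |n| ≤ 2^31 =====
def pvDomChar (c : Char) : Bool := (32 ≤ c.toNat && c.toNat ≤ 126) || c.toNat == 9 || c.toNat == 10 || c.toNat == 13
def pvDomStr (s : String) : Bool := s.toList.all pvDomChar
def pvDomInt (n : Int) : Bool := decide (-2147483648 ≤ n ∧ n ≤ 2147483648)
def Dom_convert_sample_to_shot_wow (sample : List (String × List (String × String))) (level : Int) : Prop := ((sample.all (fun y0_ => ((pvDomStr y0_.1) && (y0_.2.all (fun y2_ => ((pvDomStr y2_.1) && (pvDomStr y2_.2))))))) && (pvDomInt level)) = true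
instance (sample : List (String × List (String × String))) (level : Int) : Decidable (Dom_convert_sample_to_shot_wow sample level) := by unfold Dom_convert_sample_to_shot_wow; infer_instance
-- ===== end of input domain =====

-- B replaces A's indexed enumerate loop (with its id_t == len-1 test and mid-loop return)
-- by structural recursion on the turn list: [], singleton and cons cases, no indices.
-- Pre_ excludes dicts without a "dialogue" key (Python A raises KeyError there).

-- ===== PORT A =====
-- enumerate loop with the id_t == len-1 test, early return on the bare "Search:" branch
def pvGoA (n : Nat) (i : Nat) (l : List (String × String)) (pfx : String) : String :=
  match l with
  | [] => pfx
  | turn :: rest =>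
    if i == n - 1 then
      let pfx := pfx ++ "User: " ++ turn.1 ++ "\n"
      if turn.2 != "" then pvGoA n (i+1) rest (pfx ++ "Search: " ++ turn.2 ++ "\n")
      else pfx ++ "Search:"        -- the early 'return prefix'
    else pvGoA n (i+1) rest (pfx ++ "User: " ++ turn.1 ++ "\n" ++ "Assistant: " ++ turn.2 ++ "\n")

def convert_sample_to_shot_wow (sample : List (String × List (String × String))) (level : Int) : String :=
  let dialogue := ((PySem.Dict.mk sample).get? "dialogue").getD []
  pvGoA dialogue.length 0 dialogue "Dialogue:\n"

-- ===== PORT B =====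
-- B's recursive fmt helper: structural recursion on the turn list
def pvFmtB : List (String × String) → String
  | [] => ""
  | (u, v) :: rest =>
    if rest.length > 0 then
      "User: " ++ u ++ "\n" ++ "Assistant: " ++ v ++ "\n" ++ pvFmtB rest
    else
      "User: " ++ u ++ "\n" ++ (if v != "" then "Search: " ++ v ++ "\n" else "Search:")

def convert_sample_to_shot_wow_alt (sample : List (String × List (String × String))) (level : Int) : String :=
  "Dialogue:\n" ++ pvFmtB (((PySem.Dict.mk sample).get? "dialogue").getD [])

-- ===== PRECONDITION & SPEC =====
-- Pre_: the "dialogue" key must be present (Python A raises KeyError otherwise)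
def Pre_convert_sample_to_shot_wow (sample : List (String × List (String × String))) (level : Int) : Prop :=
  ((PySem.Dict.mk sample).get? "dialogue").isSome = true
instance (sample : List (String × List (String × String))) (level : Int) : Decidable (Pre_convert_sample_to_shot_wow sample level) := by unfold Pre_convert_sample_to_shot_wow; infer_instance

def pvWitness_convert_sample_to_shot_wow : (List (String × List (String × String))) × Int :=
  ([("dialogue", [("hi", "cats")])], 0)

def Spec_convert_sample_to_shot_wow (sample : List (String × List (String × String))) (level : Int) (out : String) : Prop := out = convert_sample_to_shot_wow_alt sample level
instance (sample : List (String × List (String × String))) (level : Int) (out : String) : Decidable (Spec_convert_sample_to_shot_wow sample level out) := by unfold Spec_convert_sample_to_shot_wow; infer_instance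

-- ===== CLAIM (what is proved, stated in full; the proofs are below) =====
def Claim_equal_convert_sample_to_shot_wow : Prop := ∀ (sample : List (String × List (String × String))) (level : Int), Dom_convert_sample_to_shot_wow sample level → Pre_convert_sample_to_shot_wow sample level → Spec_convert_sample_to_shot_wow sample level (convert_sample_to_shot_wow sample level)

-- ===== LEMMAS AND PROOFS =====

-- loop invariant: A's loop from index i (i + length = n) appends exactly B's fmt of the suffix
lemma pvGoA_eq (d : List (String × String)) :
    ∀ (i n : Nat) (pfx : String), i + d.length = n →
    pvGoA n i d pfx = pfx ++ pvFmtB d := by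
  induction d with
  | nil => intro i n pfx _; simp [pvGoA, pvFmtB]
  | cons x rest ih =>
    intro i n pfx hn
    obtain ⟨u, v⟩ := x
    cases rest with
    | nil =>
      have hi : (i == n - 1) = true := by simp at hn ⊢; omega
      simp [pvGoA, hi, pvFmtB]
      split <;> simp [← String.append_assoc]
    | cons y t =>
      have hi : (i == n - 1) = false := by simp at hn ⊢; omega
      rw [pvGoA]
      simp only [hi, Bool.false_eq_true, if_false]
      rw [ih (i+1) n _ (by simp at hn ⊢; omega)]
      simp [pvFmtB, ← String.append_assoc]

-- ===== VERDICT (by name: the statement is the Claim_ definition above) =====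
theorem convert_sample_to_shot_wow_spec : Claim_equal_convert_sample_to_shot_wow := by
  intro sample level _ _
  unfold Spec_convert_sample_to_shot_wow convert_sample_to_shot_wow convert_sample_to_shot_wow_alt
  exact pvGoA_eq _ 0 _ _ (by simp)
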